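-- pv_equiv track=rewrite | github.com/Pringley/patentpaper2 | code.py | unique_sets
-- ===== SOURCE A (Python) =====
-- def unique_sets(dct):
--     """Given a dict of iterables, return unique elements in each."""
--     result = {}
--     for key, category in dct.items():
--         remaining = dct.copy()
--         del remaining[key]
--         all_others = set()
--         for others in remaining.values():
--             all_others |= set(others)
--         result[key] = set(category) - all_others
--     return result
-- ===== SOURCE B (Python) =====
-- def _containment_count(dct):
--     """count[e] = number of dict values whose set contains e."""
--     count = {}
--     for category in dct.values():
--         for e in set(category):
--             count[e] = count.get(e, 0) + 1
--     return count
--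
-- def unique_sets(dct):
--     """Given a dict of iterables, return unique elements in each."""
--     count = _containment_count(dct)
--     return {key: {e for e in set(category) if count[e] == 1}
--             for key, category in dct.items()}
-- ===== Notes on version B (the rewrite author's own statement) =====
-- stated objective: faster
-- what changed: Replaces A's per-key union of all other values (a nested rescan of the whole dict for every key) with one flat pass that counts, for each element, how many values contain it, followed by a single filter pass keeping elements whose count is 1.
import Mathlib
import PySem

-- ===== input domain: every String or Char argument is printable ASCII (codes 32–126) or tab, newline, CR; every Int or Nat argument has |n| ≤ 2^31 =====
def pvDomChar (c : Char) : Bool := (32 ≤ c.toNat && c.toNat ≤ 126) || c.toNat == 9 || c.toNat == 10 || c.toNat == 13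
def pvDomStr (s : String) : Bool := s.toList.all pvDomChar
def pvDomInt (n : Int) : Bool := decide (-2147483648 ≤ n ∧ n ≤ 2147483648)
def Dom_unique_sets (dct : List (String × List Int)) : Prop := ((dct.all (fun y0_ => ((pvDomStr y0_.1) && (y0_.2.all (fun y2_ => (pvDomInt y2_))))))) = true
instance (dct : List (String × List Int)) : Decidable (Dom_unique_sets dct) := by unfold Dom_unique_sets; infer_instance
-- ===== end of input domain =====

-- B replaces A's per-key union of all other values with one flat counting pass plus one filter pass (asymptotically faster).


-- ===== PORT A =====
def unique_sets (dct : List (String × List Int)) : List (String × List Int) :=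
  (dct.foldl
    (fun result kc =>
      let remaining : PySem.Dict String (List Int) := (PySem.Dict.mk dct).erase kc.1
      let all_others : PySem.Set Int :=
        remaining.values.foldl
          (fun s others => PySem.Set.union s (PySem.Set.ofList others)) PySem.Set.empty
      result.insert kc.1 (PySem.Set.diff (PySem.Set.ofList kc.2) all_others))
    PySem.Dict.empty).items

-- ===== PORT B =====
-- B's helper _containment_count: count[e] = number of dict values whose set contains e
def containment_count (dct : List (String × List Int)) : PySem.Dict Int Int :=
  dct.foldl
    (fun c kc => (PySem.Set.ofList kc.2).foldl (fun c e => c.insert e (c.getD e 0 + 1)) c)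
    PySem.Dict.empty

def unique_sets_alt (dct : List (String × List Int)) : List (String × List Int) :=
  dct.map (fun kc =>
    (kc.1, (PySem.Set.ofList kc.2).filter (fun e => (containment_count dct).getD e 0 == 1)))

-- ===== PRECONDITION & SPEC =====
-- The list stands for a Python dict, whose keys are necessarily pairwise distinct;
-- on duplicate-key lists neither port models any Python input.
def Pre_unique_sets (dct : List (String × List Int)) : Prop := (dct.map Prod.fst).Nodup
instance (dct : List (String × List Int)) : Decidable (Pre_unique_sets dct) := by unfold Pre_unique_sets; infer_instance
def pvWitness_unique_sets : (List (String × List Int)) := [("a", [1, 2]), ("b", [2, 3])]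
def Spec_unique_sets (dct : List (String × List Int)) (out : List (String × List Int)) : Prop := out = unique_sets_alt dct
instance (dct : List (String × List Int)) (out : List (String × List Int)) : Decidable (Spec_unique_sets dct out) := by unfold Spec_unique_sets; infer_instance

-- ===== CLAIM (what is proved, stated in full; the proofs are below) =====
def Claim_equal_unique_sets : Prop := ∀ (dct : List (String × List Int)), Dom_unique_sets dct → Pre_unique_sets dct → Spec_unique_sets dct (unique_sets dct)

-- ===== LEMMAS AND PROOFS =====

-- membership in A's running union of value-sets
theorem mem_foldl_union (vs : List (List Int)) (s : PySem.Set Int) (y : Int) :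
    (y ∈ vs.foldl (fun s o => PySem.Set.union s (PySem.Set.ofList o)) s) ↔
      y ∈ s ∨ ∃ o ∈ vs, y ∈ o := by
  induction vs generalizing s with
  | nil => simp
  | cons v vs ih =>
      simp [List.foldl_cons, ih, PySem.Set.mem_union, PySem.Set.mem_ofList]
      tauto

-- B's counter counts, for each element, the number of dict values containing it
theorem count_getD (dct : List (String × List Int)) (c : PySem.Dict Int Int) (e : Int) :
    (dct.foldl
      (fun c kc => (PySem.Set.ofList kc.2).foldl (fun c e => c.insert e (c.getD e 0 + 1)) c)
      c).getD e 0 = c.getD e 0 + (dct.countP (fun kc => decide (e ∈ kc.2)) : Int) := by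
  induction dct generalizing c with
  | nil => simp
  | cons kc dct ih =>
      rw [List.foldl_cons, ih, PySem.Dict.getD_foldl_insert_add_one, List.countP_cons]
      have hn := PySem.Set.nodup_ofList (xs := kc.2)
      by_cases h : e ∈ kc.2
      · rw [List.count_eq_one_of_mem hn (by simpa [PySem.Set.mem_ofList] using h)]
        simp [h]; ring
      · rw [List.count_eq_zero_of_not_mem (by simpa [PySem.Set.mem_ofList] using h)]
        simp [h]

-- in a dict with distinct keys, the entries carrying kc's key are exactly [kc]
theorem filter_key_eq (dct : List (String × List Int)) (kc : String × List Int)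
    (hnd : (dct.map Prod.fst).Nodup) (hm : kc ∈ dct) :
    dct.filter (fun x => x.1 == kc.1) = [kc] := by
  induction dct with
  | nil => cases hm
  | cons hd tl ih =>
      rw [List.map_cons, List.nodup_cons] at hnd
      by_cases h : hd.1 = kc.1
      · have hkctl : kc ∉ tl := by
          intro hkc
          exact hnd.1 (h ▸ (List.mem_map.mpr ⟨kc, hkc, rfl⟩))
        have hdkc : hd = kc := by
          rcases List.mem_cons.mp hm with h' | h'
          · exact h'.symm
          · exact absurd h' hkctl
        have : tl.filter (fun x => x.1 == kc.1) = [] := by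
          apply List.filter_eq_nil_iff.mpr
          intro x hx hbe
          refine hnd.1 ?_
          rw [h, ← beq_iff_eq.mp hbe]
          exact List.mem_map.mpr ⟨x, hx, rfl⟩
        subst hdkc
        rw [List.filter_cons_of_pos (by simp), this]
      · have hm' : kc ∈ tl := by
          rcases List.mem_cons.mp hm with h' | h'
          · exact absurd (h' ▸ rfl) h
          · exact h'
        rw [List.filter_cons_of_neg (by simpa using h), ih hnd.2 hm']

-- the per-key value agreement: A's set difference equals B's count-filter
theorem value_eq (dct : List (String × List Int)) (kc : String × List Int)
    (hnd : (dct.map Prod.fst).Nodup) (hm : kc ∈ dct) :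
    PySem.Set.diff (PySem.Set.ofList kc.2)
      ((((PySem.Dict.mk dct).erase kc.1).values).foldl
        (fun s o => PySem.Set.union s (PySem.Set.ofList o)) PySem.Set.empty) =
    (PySem.Set.ofList kc.2).filter (fun e => (containment_count dct).getD e 0 == 1) := by
  show List.filter _ _ = _
  apply List.filter_congr
  intro e he
  have he2 : e ∈ kc.2 := (PySem.Set.mem_ofList _ _).mp he
  have hc : (containment_count dct).getD e 0 = (dct.countP (fun kc => decide (e ∈ kc.2)) : Int) := by
    have h := count_getD dct PySem.Dict.empty e
    rw [PySem.Dict.getD_empty, zero_add] at h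
    exact h
  rw [hc]
  -- split the total count at key = kc.1
  have hsplit : dct.countP (fun x => decide (e ∈ x.2)) =
      (dct.filter (fun x => decide (e ∈ x.2))).countP (fun x => x.1 == kc.1) +
      (dct.filter (fun x => decide (e ∈ x.2))).countP (fun x => !(x.1 == kc.1)) := by
    have := List.length_eq_countP_add_countP (l := dct.filter (fun x => decide (e ∈ x.2)))
      (p := fun x => x.1 == kc.1)
    simpa [List.countP_eq_length_filter] using this
  have hself : (dct.filter (fun x => decide (e ∈ x.2))).countP (fun x => x.1 == kc.1) = 1 := by
    rw [List.countP_filter]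
    have : dct.countP (fun x => (x.1 == kc.1) && decide (e ∈ x.2)) =
        (dct.filter (fun x => x.1 == kc.1)).countP (fun x => decide (e ∈ x.2)) := by
      rw [List.countP_filter]
      apply List.countP_congr
      intro x _
      simp [Bool.and_comm]
    rw [this, filter_key_eq dct kc hnd hm]
    simp [he2]
  have hoth : (dct.filter (fun x => decide (e ∈ x.2))).countP (fun x => !(x.1 == kc.1)) =
      (dct.filter (fun x => !(x.1 == kc.1))).countP (fun x => decide (e ∈ x.2)) := by
    rw [List.countP_filter, List.countP_filter]
    apply List.countP_congr
    intro x _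
    simp [Bool.and_comm]
  -- A's all_others membership
  have hmem : (e ∈ (((PySem.Dict.mk dct).erase kc.1).values).foldl
      (fun s o => PySem.Set.union s (PySem.Set.ofList o)) PySem.Set.empty) ↔
      ∃ x ∈ dct.filter (fun x => !(x.1 == kc.1)), e ∈ x.2 := by
    rw [mem_foldl_union]
    constructor
    · rintro (h | ⟨o, ho, heo⟩)
      · cases h
      · rcases List.mem_map.mp ho with ⟨x, hx, rfl⟩
        exact ⟨x, hx, heo⟩
    · rintro ⟨x, hx, hex⟩
      exact Or.inr ⟨x.2, List.mem_map.mpr ⟨x, hx, rfl⟩, hex⟩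
  rw [Bool.eq_iff_iff]
  simp only [Bool.not_eq_eq_eq_not, Bool.not_true, beq_iff_eq]
  constructor
  · intro hnotmem
    have hcontains : (e ∈ (((PySem.Dict.mk dct).erase kc.1).values).foldl
        (fun s o => PySem.Set.union s (PySem.Set.ofList o)) PySem.Set.empty) → False := by
      intro hmem'
      have := (PySem.Set.contains_iff _ _).mpr hmem'
      rw [this] at hnotmem; cases hnotmem
    have h0 : (dct.filter (fun x => !(x.1 == kc.1))).countP (fun x => decide (e ∈ x.2)) = 0 := by
      rw [List.countP_eq_zero]
      intro x hx
      simp only [decide_eq_true_eq]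
      intro hex
      exact hcontains (hmem.mpr ⟨x, hx, hex⟩)
    rw [hsplit, hself, hoth, h0]
    simp
  · intro hone
    have h0 : (dct.filter (fun x => !(x.1 == kc.1))).countP (fun x => decide (e ∈ x.2)) = 0 := by
      rw [hsplit, hself, hoth] at hone
      omega
    by_cases hc : PySem.Set.contains
        ((((PySem.Dict.mk dct).erase kc.1).values).foldl
          (fun s o => PySem.Set.union s (PySem.Set.ofList o)) PySem.Set.empty) e
    · exfalso
      rcases hmem.mp ((PySem.Set.contains_iff _ _).mp hc) with ⟨x, hx, hex⟩
      have := List.countP_eq_zero.mp h0 x hx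
      simp [hex] at this
    · exact Bool.eq_false_iff.mpr hc

-- ===== VERDICT (by name: the statement is the Claim_ definition above) =====
theorem unique_sets_spec : Claim_equal_unique_sets := by
  intro dct _ hpre
  have hnd : (List.map Prod.fst dct).Nodup := hpre
  show unique_sets dct = unique_sets_alt dct
  have hA := PySem.Dict.items_foldl_insert_fresh dct Prod.fst
      (fun kc => PySem.Set.diff (PySem.Set.ofList kc.2)
        ((((PySem.Dict.mk dct).erase kc.1).values).foldl
          (fun s o => PySem.Set.union s (PySem.Set.ofList o)) PySem.Set.empty))
      PySem.Dict.empty (fun a _ => rfl) hnd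
  calc unique_sets dct
      = List.map (fun kc => (kc.1, PySem.Set.diff (PySem.Set.ofList kc.2)
          ((((PySem.Dict.mk dct).erase kc.1).values).foldl
            (fun s o => PySem.Set.union s (PySem.Set.ofList o)) PySem.Set.empty))) dct := by
        show (List.foldl
          (fun result kc => result.insert kc.1 (PySem.Set.diff (PySem.Set.ofList kc.2)
            ((((PySem.Dict.mk dct).erase kc.1).values).foldl
              (fun s o => PySem.Set.union s (PySem.Set.ofList o)) PySem.Set.empty)))
          PySem.Dict.empty dct).items = _
        rw [hA]
        simp [PySem.Dict.empty]
    _ = unique_sets_alt dct := by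
        unfold unique_sets_alt
        apply List.map_congr_left
        intro kc hkc
        exact congrArg (fun v => (kc.1, v)) (value_eq dct kc hnd hkc)
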